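-- pv_equiv track=rewrite | github.com/SebastianArriagada/python-work | codility/PassingCars.py | solution
-- ===== SOURCE A (Python) =====
-- def solution(A):
--     # write your code in Python 3.6
--     first = A[0]
--     count = 0
--     par = 1
--
--     for auto in A[1:len(A)]:
--         if auto == first:
--             par += 1
--         else:
--             count += par
--
--         if count > 1000000000:
--             return -1
--
--
--     return count
-- ===== SOURCE B (Python) =====
-- def solution(A):
--     first = A[0]
--     total_non_first = sum(1 for x in A[1:] if x != first)
--     count = 0
--     non_first_seen = 0
--     for x in A:
--         if x == first:
--             count += total_non_first - non_first_seen
--         else: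
--             non_first_seen += 1
--     return -1 if count > 1000000000 else count
-- ===== Notes on version B (the rewrite author's own statement) =====
-- stated objective: alternative
-- what changed: Instead of accumulating a running count of first-equal elements and adding it at each differing element (with a per-iteration overflow early-exit), B precomputes the total number of differing elements and, scanning once, adds the remaining-differing count at each first-equal element, checking the 1e9 cap once at the end (valid since the accumulated count is monotone).
import Mathlib
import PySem

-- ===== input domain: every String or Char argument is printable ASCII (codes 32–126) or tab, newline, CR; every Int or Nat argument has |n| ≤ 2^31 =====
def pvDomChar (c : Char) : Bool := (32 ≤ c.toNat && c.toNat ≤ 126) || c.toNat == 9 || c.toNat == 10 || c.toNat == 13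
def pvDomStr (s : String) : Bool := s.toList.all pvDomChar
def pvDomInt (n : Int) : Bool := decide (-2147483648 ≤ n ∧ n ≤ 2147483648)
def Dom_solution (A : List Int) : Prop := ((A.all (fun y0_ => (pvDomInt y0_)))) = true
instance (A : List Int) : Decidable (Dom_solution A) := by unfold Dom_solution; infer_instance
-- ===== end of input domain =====

-- B pairs each first-equal element with the differing elements after it (precomputed total
-- minus differing-seen) and applies the 1e9 cap once at the end; A accumulates a running
-- first-equal count at each differing element with a per-iteration early exit. Same values.

-- ===== PORT A =====
-- A's loop over A[1:] with state (count, par) and the early `return -1`.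
def solLoopA (first : Int) : List Int → Int → Int → Int
  | [], count, _ => count
  | x :: rest, count, par =>
    let count' := if x = first then count else count + par
    let par' := if x = first then par + 1 else par
    if count' > 1000000000 then -1 else solLoopA first rest count' par'

def solution (A : List Int) : Int :=
  match A with
  | [] => 0          -- A raises IndexError indexing the first element of an empty list; excluded by Pre_solution
  | first :: rest => solLoopA first rest 0 1

-- ===== PORT B =====
-- B's single pass over all of A with state (count, non_first_seen).
def solLoopB (first total : Int) : List Int → Int → Int → Int
  | [], count, _ => count
  | x :: rest, count, seen =>
    if x = first then solLoopB first total rest (count + (total - seen)) seen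
    else solLoopB first total rest count (seen + 1)

def solCountNonFirst (first : Int) : List Int → Int
  | [] => 0
  | x :: rest => (if x ≠ first then 1 else 0) + solCountNonFirst first rest

def solution_alt (A : List Int) : Int :=
  match A with
  | [] => 0          -- B raises IndexError indexing the first element of an empty list; excluded by Pre_solution
  | first :: rest =>
    let total := solCountNonFirst first rest
    let count := solLoopB first total (first :: rest) 0 0
    if count > 1000000000 then -1 else count

-- ===== PRECONDITION & SPEC =====
-- Pre_ excludes only the empty list, on which both programs raise IndexError indexing the first element.
def Pre_solution (A : List Int) : Prop := A ≠ []
instance (A : List Int) : Decidable (Pre_solution A) := by unfold Pre_solution; infer_instance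
def pvWitness_solution : List Int := [0, 1, 0, 1, 1]

def Spec_solution (A : List Int) (out : Int) : Prop := out = solution_alt A
instance (A : List Int) (out : Int) : Decidable (Spec_solution A out) := by unfold Spec_solution; infer_instance

-- ===== CLAIM (what is proved, stated in full; the proofs are below) =====
def Claim_equal_solution : Prop := ∀ (A : List Int), Dom_solution A → Pre_solution A → Spec_solution A (solution A)

-- ===== LEMMAS AND PROOFS =====

-- pair sum counted from the differing side: for each first-equal x, differing elements after it
def solS (first : Int) : List Int → Int
  | [] => 0
  | x :: rest => (if x = first then solCountNonFirst first rest else 0) + solS first rest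

theorem solCountNonFirst_nonneg (first : Int) (l : List Int) : 0 ≤ solCountNonFirst first l := by
  induction l with
  | nil => simp [solCountNonFirst]
  | cons x rest ih => simp only [solCountNonFirst]; split_ifs <;> omega

theorem solS_nonneg (first : Int) (l : List Int) : 0 ≤ solS first l := by
  induction l with
  | nil => simp [solS]
  | cons x rest ih =>
    have := solCountNonFirst_nonneg first rest
    simp only [solS]; split_ifs <;> omega

-- A's loop, under its invariants, equals the closed form with the cap applied at the end.
theorem solLoopA_closed (first : Int) (l : List Int) : ∀ (count par : Int), 1 ≤ par → count ≤ 1000000000 →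
    solLoopA first l count par =
      (if count + par * solCountNonFirst first l + solS first l > 1000000000 then -1
       else count + par * solCountNonFirst first l + solS first l) := by
  induction l with
  | nil => intro count par hp hc; simp [solLoopA, solCountNonFirst, solS]; omega
  | cons x rest ih =>
    intro count par hp hc
    have hnf := solCountNonFirst_nonneg first rest
    have hs := solS_nonneg first rest
    by_cases hx : x = first
    · have h1 : solLoopA first (x :: rest) count par = solLoopA first rest count (par + 1) := by
        simp only [solLoopA, hx]
        simp
        omega
      have h2 : solCountNonFirst first (x :: rest) = solCountNonFirst first rest := by
        simp [solCountNonFirst, hx]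
      have h3 : solS first (x :: rest) = solCountNonFirst first rest + solS first rest := by
        simp [solS, hx]
      rw [h1, h2, h3, ih count (par + 1) (by omega) hc]
      have harith : count + (par + 1) * solCountNonFirst first rest + solS first rest
          = count + par * solCountNonFirst first rest + (solCountNonFirst first rest + solS first rest) := by ring
      rw [harith]
    · have h2 : solCountNonFirst first (x :: rest) = 1 + solCountNonFirst first rest := by
        simp [solCountNonFirst, hx]
      have h3 : solS first (x :: rest) = solS first rest := by
        simp [solS, hx]
      rw [h2, h3]
      by_cases hover : count + par > 1000000000
      · have h1 : solLoopA first (x :: rest) count par = -1 := by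
          simp only [solLoopA]
          simp [hx]
          omega
        rw [h1, if_pos]
        nlinarith [mul_nonneg (by omega : (0:Int) ≤ par) hnf]
      · have h1 : solLoopA first (x :: rest) count par = solLoopA first rest (count + par) par := by
          simp only [solLoopA]
          simp [hx]
          omega
        rw [h1, ih (count + par) par hp (by omega)]
        have harith : count + par + par * solCountNonFirst first rest + solS first rest
            = count + par * (1 + solCountNonFirst first rest) + solS first rest := by ring
        rw [harith]

-- B's loop, when seen + (differing remaining) = total, equals count + solS.
theorem solLoopB_closed (first total : Int) (l : List Int) : ∀ (count seen : Int),
    seen + solCountNonFirst first l = total →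
    solLoopB first total l count seen = count + solS first l := by
  induction l with
  | nil => intro count seen h; simp [solLoopB, solS]
  | cons x rest ih =>
    intro count seen h
    simp only [solCountNonFirst] at h
    by_cases hx : x = first
    · simp only [solLoopB, solS, hx]
      rw [ih (count + (total - seen)) seen (by simp [hx] at h; omega)]
      simp at h ⊢
      omega
    · simp only [solLoopB, if_neg hx, solS]
      rw [ih count (seen + 1) (by simp [hx] at h; omega)]
      simp

-- ===== VERDICT (by name: the statement is the Claim_ definition above) =====
theorem solution_spec : Claim_equal_solution := by
  intro A _ hpre
  unfold Spec_solution
  match A with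
  | [] => exact absurd rfl hpre
  | first :: rest =>
    simp only [solution, solution_alt]
    rw [solLoopA_closed first rest 0 1 (by omega) (by omega)]
    rw [solLoopB_closed first (solCountNonFirst first rest) (first :: rest) 0 0
        (by simp [solCountNonFirst])]
    have : (0:Int) + solS first (first :: rest)
         = 0 + 1 * solCountNonFirst first rest + solS first rest := by
      simp [solS]
    rw [this]
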